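-- pv_equiv track=rewrite | github.com/cpiccin/FIUBA | Algoritmos y Programacion I/Ejercicios - Parcialito 1/Maximos columna.py | maximos_columnas
-- ===== SOURCE A (Python) =====
-- def maximos_columnas(matriz):
-- 	maximos = []
-- 	for j in range(len(matriz[0])):
-- 		columnas = []
-- 		for i in range(len(matriz)):
-- 			columnas.append(matriz[i][j])
-- 		maximos.append(max(columnas))
-- 	return maximos
-- ===== SOURCE B (Python) =====
-- def maximos_columnas(matriz):
-- 	maximos = list(matriz[0])
-- 	for i in range(1, len(matriz)):
-- 		fila = matriz[i]
-- 		for j in range(len(maximos)):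
-- 			if maximos[j] < fila[j]:
-- 				maximos[j] = fila[j]
-- 	return maximos
-- ===== Notes on version B (the rewrite author's own statement) =====
-- stated objective: alternative
-- what changed: Single row-major pass threading a running per-column maxima vector initialised from the first row, instead of gathering each column into a temporary list and calling max on it; no temporary column lists are built.
import Mathlib
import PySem

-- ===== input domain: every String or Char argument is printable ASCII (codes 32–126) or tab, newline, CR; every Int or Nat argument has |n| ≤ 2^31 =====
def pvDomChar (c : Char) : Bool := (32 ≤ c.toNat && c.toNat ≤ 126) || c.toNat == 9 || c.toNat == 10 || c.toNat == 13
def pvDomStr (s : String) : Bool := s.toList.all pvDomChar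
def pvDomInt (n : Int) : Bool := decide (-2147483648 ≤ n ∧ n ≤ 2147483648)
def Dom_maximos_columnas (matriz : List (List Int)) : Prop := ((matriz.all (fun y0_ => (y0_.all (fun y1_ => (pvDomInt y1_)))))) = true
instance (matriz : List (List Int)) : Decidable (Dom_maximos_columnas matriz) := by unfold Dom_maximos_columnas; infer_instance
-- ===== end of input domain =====

-- B changes the decomposition: a single row-major pass updating a running per-column
-- maxima vector, instead of A's column-by-column gathering into temporary lists.

-- ===== PORT A =====
def maximos_columnas (matriz : List (List Int)) : List Int :=
  (PySem.List.pyRange 0 (PySem.List.len (PySem.List.pyGetD matriz 0 [])) 1).foldl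
    (fun maximos j =>
      maximos ++
        [(PySem.List.max?
            ((PySem.List.pyRange 0 (PySem.List.len matriz) 1).foldl
              (fun cols i => cols ++ [PySem.List.pyGetD (PySem.List.pyGetD matriz i []) j 0]) [])
            (fun x => x)).getD 0]) []

-- ===== PORT B =====
def maximos_columnas_alt (matriz : List (List Int)) : List Int :=
  (PySem.List.pyRange 1 (PySem.List.len matriz) 1).foldl
    (fun maximos i =>
      (PySem.List.pyRange 0 (PySem.List.len maximos) 1).foldl
        (fun acc j =>
          if PySem.List.pyGetD acc j 0 < PySem.List.pyGetD (PySem.List.pyGetD matriz i []) j 0 then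
            PySem.List.pySetD acc j (PySem.List.pyGetD (PySem.List.pyGetD matriz i []) j 0)
          else acc) maximos)
    (PySem.List.pyGetD matriz 0 [])

-- ===== PRECONDITION & SPEC =====
-- Pre_ excludes exactly the inputs where Python A raises IndexError: the empty matrix
-- (matriz[0]) and ragged matrices where some row is shorter than the first row.
def Pre_maximos_columnas (matriz : List (List Int)) : Prop :=
  matriz ≠ [] ∧ ∀ r ∈ matriz, (matriz.headD []).length ≤ r.length
instance (matriz : List (List Int)) : Decidable (Pre_maximos_columnas matriz) := by
  unfold Pre_maximos_columnas; infer_instance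
def pvWitness_maximos_columnas : List (List Int) := [[1, 5, 2], [4, 0, 2]]
def Spec_maximos_columnas (matriz : List (List Int)) (out : List Int) : Prop := out = maximos_columnas_alt matriz
instance (matriz : List (List Int)) (out : List Int) : Decidable (Spec_maximos_columnas matriz out) := by unfold Spec_maximos_columnas; infer_instance

-- ===== CLAIM (what is proved, stated in full; the proofs are below) =====
def Claim_equal_maximos_columnas : Prop := ∀ (matriz : List (List Int)), Dom_maximos_columnas matriz → Pre_maximos_columnas matriz → Spec_maximos_columnas matriz (maximos_columnas matriz)

-- ===== LEMMAS AND PROOFS =====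

-- setting position a of a map over range yields a map with that position replaced
theorem pv_set_map_range (n a : Nat) (h : Nat → Int) (v : Int) :
    ((List.range n).map h).set a v
      = (List.range n).map (fun k => if k = a then v else h k) := by
  apply List.ext_getElem
  · simp
  · intro i h1 h2
    simp only [List.getElem_set, List.getElem_map, List.getElem_range]
    by_cases hia : a = i
    · subst hia; simp
    · have hia' : i ≠ a := fun hh => hia hh.symm
      simp [hia, hia']

-- indexing a map over range
theorem pv_pyGetD_map_range (n k : Nat) (hk : k < n) (h : Nat → Int) :
    PySem.List.pyGetD ((List.range n).map h) (k : Int) 0 = h k := by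
  rw [PySem.List.pyGetD_natCast]
  rw [List.getD_eq_getElem _ _ (by simpa using hk)]
  simp

-- a list is the map of its own entries over its range of indices
theorem pv_self_map_range (r : List Int) :
    (List.range r.length).map (fun (k : Nat) => PySem.List.pyGetD r (k : Int) 0) = r := by
  apply List.ext_getElem
  · simp
  · intro i h1 h2
    simp only [List.getElem_map, List.getElem_range, PySem.List.pyGetD_natCast]
    rw [List.getD_eq_getElem _ _ h2]

-- B's inner loop from index a: positions below a already hold the row-merged maxima
theorem pv_inner_gen (row : List Int) (n : Nat) (g : Nat → Int) :
    ∀ a : Nat, a ≤ n →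
    (PySem.List.pyRange (a : Int) (n : Int) 1).foldl
      (fun acc j =>
        if PySem.List.pyGetD acc j 0 < PySem.List.pyGetD row j 0 then
          PySem.List.pySetD acc j (PySem.List.pyGetD row j 0)
        else acc)
      ((List.range n).map
        (fun k => if k < a then max (g k) (PySem.List.pyGetD row (k : Int) 0) else g k))
      = (List.range n).map (fun (k : Nat) => max (g k) (PySem.List.pyGetD row (k : Int) 0)) := by
  intro a ha
  induction hd : n - a generalizing a with
  | zero =>
    have hna : a = n := by omega
    subst hna
    rw [PySem.List.pyRange_one_eq_nil le_rfl, List.foldl_nil]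
    apply List.map_congr_left
    intro k hk
    simp only [List.mem_range] at hk
    simp [hk]
  | succ m ih =>
    have han : a < n := by omega
    rw [PySem.List.pyRange_one_cons (by exact_mod_cast han), List.foldl_cons]
    have hget :
        PySem.List.pyGetD
          ((List.range n).map
            (fun k => if k < a then max (g k) (PySem.List.pyGetD row (k : Int) 0) else g k))
          (a : Int) 0 = g a := by
      rw [pv_pyGetD_map_range n a han]
      simp
    have hstep :
        (if PySem.List.pyGetD
              ((List.range n).map
                (fun k => if k < a then max (g k) (PySem.List.pyGetD row (k : Int) 0) else g k))
              (a : Int) 0 < PySem.List.pyGetD row (a : Int) 0 then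
            PySem.List.pySetD
              ((List.range n).map
                (fun k => if k < a then max (g k) (PySem.List.pyGetD row (k : Int) 0) else g k))
              (a : Int) (PySem.List.pyGetD row (a : Int) 0)
          else
            ((List.range n).map
              (fun k => if k < a then max (g k) (PySem.List.pyGetD row (k : Int) 0) else g k)))
          = (List.range n).map
              (fun k => if k < a + 1 then max (g k) (PySem.List.pyGetD row (k : Int) 0) else g k) := by
      rw [hget]
      by_cases hc : g a < PySem.List.pyGetD row (a : Int) 0
      · rw [if_pos hc, PySem.List.pySetD_natCast, pv_set_map_range]
        apply List.map_congr_left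
        intro k hk
        by_cases hka : k = a
        · subst hka
          simp
          exact le_of_lt (by simpa using hc)
        · by_cases hklt : k < a
          · simp [hka, hklt, Nat.lt_succ_of_lt hklt]
          · have hnot : ¬ k < a + 1 := by omega
            simp [hka, hklt, hnot]
      · rw [if_neg hc]
        apply List.map_congr_left
        intro k hk
        by_cases hka : k = a
        · subst hka
          simp
          exact le_of_not_gt (by simpa using hc)
        · by_cases hklt : k < a
          · simp [hklt, Nat.lt_succ_of_lt hklt]
          · have hnot : ¬ k < a + 1 := by omega
            simp [hklt, hnot]
    rw [hstep]
    have hih := ih (a + 1) (by omega) (by omega)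
    push_cast at hih ⊢
    exact hih

-- B's inner loop on an accumulator that is a map over range: pointwise max with the row
theorem pv_inner (row : List Int) (n : Nat) (g : Nat → Int) :
    (PySem.List.pyRange 0 (n : Int) 1).foldl
      (fun acc j =>
        if PySem.List.pyGetD acc j 0 < PySem.List.pyGetD row j 0 then
          PySem.List.pySetD acc j (PySem.List.pyGetD row j 0)
        else acc)
      ((List.range n).map g)
      = (List.range n).map (fun (k : Nat) => max (g k) (PySem.List.pyGetD row (k : Int) 0)) := by
  have h := pv_inner_gen row n g 0 (Nat.zero_le n)
  simpa using h

-- B's outer loop: folding rows into a running maxima vector, characterised per column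
theorem pv_outer (rows : List (List Int)) (n : Nat) (g : Nat → Int) :
    rows.foldl
      (fun maximos row =>
        (PySem.List.pyRange 0 (PySem.List.len maximos) 1).foldl
          (fun acc j =>
            if PySem.List.pyGetD acc j 0 < PySem.List.pyGetD row j 0 then
              PySem.List.pySetD acc j (PySem.List.pyGetD row j 0)
            else acc) maximos)
      ((List.range n).map g)
      = (List.range n).map
          (fun (k : Nat) =>
            rows.foldl (fun acc r => max acc (PySem.List.pyGetD r (k : Int) 0)) (g k)) := by
  induction rows generalizing g with
  | nil => simp
  | cons row rest ih =>
    simp only [List.foldl_cons]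
    have hlen : PySem.List.len ((List.range n).map g) = (n : Int) := by
      simp [PySem.List.len_eq]
    rw [hlen, pv_inner row n g, ih]

-- A's inner loop builds the j-th column as a map over the matrix
theorem pv_columnas (matriz : List (List Int)) (j : Int) :
    (PySem.List.pyRange 0 (PySem.List.len matriz) 1).foldl
      (fun cols i => cols ++ [PySem.List.pyGetD (PySem.List.pyGetD matriz i []) j 0]) []
      = matriz.map (fun r => PySem.List.pyGetD r j 0) := by
  rw [PySem.List.foldl_append_singleton_eq_map]
  have h2 : (PySem.List.pyRange 0 (PySem.List.len matriz) 1).map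
        (fun i => PySem.List.pyGetD (PySem.List.pyGetD matriz i []) j 0)
      = ((PySem.List.pyRange 0 (PySem.List.len matriz) 1).map
          (fun i => PySem.List.pyGetD matriz i [])).map (fun r => PySem.List.pyGetD r j 0) := by
    rw [List.map_map]; rfl
  rw [List.nil_append, h2, PySem.List.map_pyGetD_pyRange_zero]

-- ===== VERDICT (by name: the statement is the Claim_ definition above) =====
theorem maximos_columnas_spec : Claim_equal_maximos_columnas := by
  intro matriz _ _
  unfold Spec_maximos_columnas maximos_columnas maximos_columnas_alt
  cases matriz with
  | nil => simp [PySem.List.pyGetD_zero, PySem.List.pyRange_one_eq_nil, PySem.List.len_eq]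
  | cons r0 rest =>
    have hr0 : PySem.List.pyGetD (r0 :: rest) (0 : Int) [] = r0 := by
      simp [PySem.List.pyGetD_zero]
    rw [hr0]
    -- B side: drop the first row, then characterise the fold per column
    rw [PySem.List.foldl_pyRange_pyGetD (xs := r0 :: rest) (d := ([] : List Int))
        (f := fun maximos fila =>
          (PySem.List.pyRange 0 (PySem.List.len maximos) 1).foldl
            (fun acc j =>
              if PySem.List.pyGetD acc j 0 < PySem.List.pyGetD fila j 0 then
                PySem.List.pySetD acc j (PySem.List.pyGetD fila j 0)
              else acc) maximos) (init := r0) (a := 1) (by norm_num)]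
    simp only [Int.toNat_one, List.drop_succ_cons, List.drop_zero]
    have hB : rest.foldl
        (fun maximos fila =>
          (PySem.List.pyRange 0 (PySem.List.len maximos) 1).foldl
            (fun acc j =>
              if PySem.List.pyGetD acc j 0 < PySem.List.pyGetD fila j 0 then
                PySem.List.pySetD acc j (PySem.List.pyGetD fila j 0)
              else acc) maximos) r0
        = (List.range r0.length).map
            (fun (k : Nat) =>
              rest.foldl (fun acc r => max acc (PySem.List.pyGetD r (k : Int) 0))
                (PySem.List.pyGetD r0 (k : Int) 0)) := by
      conv_lhs => rw [← pv_self_map_range r0]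
      rw [pv_outer rest r0.length (fun (k : Nat) => PySem.List.pyGetD r0 (k : Int) 0)]
    rw [hB]
    -- A side: turn the append-fold into a map over the column indices
    rw [PySem.List.foldl_append_singleton_eq_map, List.nil_append]
    rw [show PySem.List.len r0 = (r0.length : Int) from PySem.List.len_eq r0]
    rw [PySem.List.pyRange_one (0 : Int) (r0.length : Int)]
    simp only [Int.sub_zero, Int.toNat_natCast, List.map_map, zero_add]
    apply List.map_congr_left
    intro k hk
    simp only [Function.comp_apply]
    rw [pv_columnas (r0 :: rest) (k : Int)]
    simp only [List.map_cons]
    rw [PySem.List.max?_id_cons]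
    simp only [Option.getD_some]
    rw [List.foldl_map]
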